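-- pv_equiv track=rewrite | github.com/cryogenic22/KP_SDLC | quality-gate/qg/rules_phase2.py | _pop_blocks_for_closing
-- ===== SOURCE A (Python) =====
-- def _pop_blocks_for_closing(depth: int, block_stack: list[str], open_braces: int, close_braces: int) -> int:
--     brace_delta = close_braces - open_braces
--     while brace_delta < 0 and depth > 0:
--         depth -= 1
--         if block_stack:
--             block_stack.pop()
--         brace_delta += 1
--     return depth
-- ===== SOURCE B (Python) =====
-- def _pop_blocks_for_closing(depth: int, block_stack: list[str], open_braces: int, close_braces: int) -> int:
--     # closed form: the loop runs k = clamp(open-close, 0, depth) times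
--     k = max(0, min(depth, open_braces - close_braces))
--     pop_count = min(k, len(block_stack))
--     if pop_count > 0:
--         del block_stack[-pop_count:]
--     return depth - k
-- ===== Notes on version B (the rewrite author's own statement) =====
-- stated objective: simpler
-- what changed: Replaces the decrement loop by a closed-form count k = max(0, min(depth, open_braces - close_braces)), returning depth - k and deleting the matching tail of block_stack with one slice deletion.
import Mathlib
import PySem

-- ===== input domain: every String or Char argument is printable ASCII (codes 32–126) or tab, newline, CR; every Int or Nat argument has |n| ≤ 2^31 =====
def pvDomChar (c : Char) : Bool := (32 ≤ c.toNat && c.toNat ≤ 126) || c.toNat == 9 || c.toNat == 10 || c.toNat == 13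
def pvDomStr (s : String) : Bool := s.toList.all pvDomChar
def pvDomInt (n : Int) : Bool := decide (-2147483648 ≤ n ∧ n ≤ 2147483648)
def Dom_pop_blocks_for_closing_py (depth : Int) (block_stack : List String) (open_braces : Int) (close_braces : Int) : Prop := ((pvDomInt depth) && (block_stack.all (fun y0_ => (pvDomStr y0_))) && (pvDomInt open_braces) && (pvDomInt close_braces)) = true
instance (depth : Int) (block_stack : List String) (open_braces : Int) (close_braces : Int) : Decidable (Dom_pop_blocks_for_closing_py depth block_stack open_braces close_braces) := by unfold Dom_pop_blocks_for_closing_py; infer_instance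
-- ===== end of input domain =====

-- B computes the loop count in closed form instead of looping (simpler); the Python side also
-- mutates block_stack in place — the equivalence proved here is about the RETURN value only
-- (B's Python performs the same mutation via one slice deletion).


-- ===== PORT A =====
-- the while loop of A, carrying (brace_delta, depth, block_stack); returns the final depth
def popLoopA (brace_delta depth : Int) (block_stack : List String) : Int :=
  if brace_delta < 0 ∧ depth > 0 then
    popLoopA (brace_delta + 1) (depth - 1) block_stack.dropLast
  else depth
termination_by depth.toNat
decreasing_by omega

def pop_blocks_for_closing_py (depth : Int) (block_stack : List String) (open_braces : Int) (close_braces : Int) : Int :=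
  popLoopA (close_braces - open_braces) depth block_stack

-- ===== PORT B =====
def pop_blocks_for_closing_py_alt (depth : Int) (block_stack : List String) (open_braces : Int) (close_braces : Int) : Int :=
  depth - max 0 (min depth (open_braces - close_braces))

-- ===== PRECONDITION & SPEC =====
def Spec_pop_blocks_for_closing_py (depth : Int) (block_stack : List String) (open_braces : Int) (close_braces : Int) (out : Int) : Prop := out = pop_blocks_for_closing_py_alt depth block_stack open_braces close_braces
instance (depth : Int) (block_stack : List String) (open_braces : Int) (close_braces : Int) (out : Int) : Decidable (Spec_pop_blocks_for_closing_py depth block_stack open_braces close_braces out) := by unfold Spec_pop_blocks_for_closing_py; infer_instance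

-- ===== CLAIM (what is proved, stated in full; the proofs are below) =====
def Claim_equal_pop_blocks_for_closing_py : Prop := ∀ (depth : Int) (block_stack : List String) (open_braces : Int) (close_braces : Int), Dom_pop_blocks_for_closing_py depth block_stack open_braces close_braces → Spec_pop_blocks_for_closing_py depth block_stack open_braces close_braces (pop_blocks_for_closing_py depth block_stack open_braces close_braces)

-- ===== LEMMAS AND PROOFS =====
theorem popLoopA_eq (brace_delta depth : Int) (block_stack : List String) :
    popLoopA brace_delta depth block_stack = depth - max 0 (min depth (-brace_delta)) := by
  fun_induction popLoopA with
  | case1 bd d bs h ih => rw [ih]; omega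
  | case2 bd d bs h => omega

-- ===== VERDICT (by name: the statement is the Claim_ definition above) =====
theorem pop_blocks_for_closing_py_spec : Claim_equal_pop_blocks_for_closing_py := by
  intro depth block_stack open_braces close_braces _
  unfold Spec_pop_blocks_for_closing_py pop_blocks_for_closing_py pop_blocks_for_closing_py_alt
  rw [popLoopA_eq]; omega
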